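-- pv_equiv track=rewrite | github.com/hellman/cry | py/anf/mobius.py | undo_submask_sum
-- ===== SOURCE A (Python) =====
-- def undo_submask_sum(f):
--     assert isinstance(f, list) or isinstance(f, tuple)
--     if len(f) == 1:
--         return (f[0],)
--     assert len(f) & 1 == 0
--     h = len(f) // 2
--     f0 = f[:h]
--     f1 = tuple(a - b for a, b in zip(f[:h], f[h:]))
--     sub0 = undo_submask_sum(f0)
--     sub1 = undo_submask_sum(f1)
--     return sub0 + sub1
-- ===== SOURCE B (Python) =====
-- def undo_submask_sum(f):
--     assert isinstance(f, list) or isinstance(f, tuple)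
--     n = len(f)
--     assert n and n & (n - 1) == 0
--     g = list(f)
--     bit = n >> 1
--     while bit:
--         for i in range(n):
--             if i & bit:
--                 g[i] = g[i ^ bit] - g[i]
--         bit >>= 1
--     return tuple(g)
-- ===== Notes on version B (the rewrite author's own statement) =====
-- stated objective: idiomatic
-- what changed: Replaced the tuple-allocating half-splitting recursion by the standard iterative in-place butterfly transform: copy the input once and run one subtract pass per bit over a single list.
import Mathlib
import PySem

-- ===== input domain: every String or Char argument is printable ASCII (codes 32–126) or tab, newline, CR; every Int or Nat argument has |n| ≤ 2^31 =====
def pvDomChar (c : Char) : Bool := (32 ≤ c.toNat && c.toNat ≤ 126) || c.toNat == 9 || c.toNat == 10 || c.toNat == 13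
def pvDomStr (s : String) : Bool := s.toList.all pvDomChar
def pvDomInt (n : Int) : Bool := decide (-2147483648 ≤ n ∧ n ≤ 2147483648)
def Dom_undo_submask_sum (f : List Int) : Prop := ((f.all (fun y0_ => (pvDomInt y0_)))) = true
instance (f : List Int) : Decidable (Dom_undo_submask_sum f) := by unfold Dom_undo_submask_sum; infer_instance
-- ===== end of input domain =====

-- B replaces A's half-splitting recursion (which allocates fresh tuples at every level) by the
-- standard in-place iterative transform over one copied list, one butterfly pass per bit.

-- ===== PORT A =====
-- A's recursion: length-1 base returns (f[0],); asserts even length; recurses on the two halves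
-- (second half replaced by pointwise first-minus-second).  On odd length ≥ 3 A raises
-- AssertionError and on length 0 it recurses forever (RecursionError); both are outside
-- Pre_undo_submask_sum, so those branches return [] here purely for totality.
def undo_submask_sum (f : List Int) : List Int :=
  if f.length = 1 then [f.headI]          -- (f[0],): length is 1, so f[0] = headI
  else if f.length % 2 = 1 then []        -- assert len(f) & 1 == 0 fails (excluded by Pre_)
  else if f.length = 0 then []            -- A diverges here (excluded by Pre_); guard for totality
  else
    undo_submask_sum (f.take (f.length / 2)) ++
      undo_submask_sum (((f.take (f.length / 2)).zip (f.drop (f.length / 2))).map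
        (fun p => p.1 - p.2))
termination_by f.length
decreasing_by
  · simp only [List.length_take]; omega
  · simp only [List.length_map, List.length_zip, List.length_take, List.length_drop]; omega

-- ===== PORT B =====
-- one butterfly pass: for i in range(n): if i & bit: g[i] = g[i ^ bit] - g[i]
def pvPass (g : List Int) (bit : Nat) : List Int :=
  (List.range g.length).foldl
    (fun r i => if i &&& bit ≠ 0 then r.set i (r.getD (i ^^^ bit) 0 - r.getD i 0) else r) g

-- while bit: pass; bit >>= 1
def pvLoop (g : List Int) (bit : Nat) : List Int :=
  if bit = 0 then g else pvLoop (pvPass g bit) (bit / 2)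
termination_by bit
decreasing_by omega

def undo_submask_sum_alt (f : List Int) : List Int :=
  -- assert n and n & (n - 1) == 0  (on failure B raises, like A; [] is a totality filler)
  if f.length ≠ 0 ∧ f.length &&& (f.length - 1) = 0 then pvLoop f (f.length / 2) else []

-- ===== PRECONDITION & SPEC =====
-- Pre_ admits exactly the inputs on which A returns normally: length a power of two.
-- (On other even lengths A hits a failing assert deeper in the recursion; on odd lengths ≥ 3 the
-- top-level assert fails; on length 0 A recurses forever — A never returns a value outside Pre_.)
def Pre_undo_submask_sum (f : List Int) : Prop := ∃ k, k ≤ f.length ∧ f.length = 2 ^ k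
instance (f : List Int) : Decidable (Pre_undo_submask_sum f) := by
  unfold Pre_undo_submask_sum; infer_instance
def pvWitness_undo_submask_sum : List Int := [3, 5, -1, 7]

def Spec_undo_submask_sum (f : List Int) (out : List Int) : Prop := out = undo_submask_sum_alt f
instance (f : List Int) (out : List Int) : Decidable (Spec_undo_submask_sum f out) := by
  unfold Spec_undo_submask_sum; infer_instance

-- ===== CLAIM (what is proved, stated in full; the proofs are below) =====
def Claim_equal_undo_submask_sum : Prop :=
  ∀ (f : List Int), Dom_undo_submask_sum f → Pre_undo_submask_sum f →
    Spec_undo_submask_sum f (undo_submask_sum f)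

-- ===== LEMMAS AND PROOFS =====

-- bits of 2 ^ k + a for a < 2 ^ k
lemma pv_topbit {k a : Nat} (u : Nat) (ha : a < 2 ^ k) :
    (2 ^ k + a).testBit u = (decide (u = k) || a.testBit u) := by
  rcases lt_trichotomy u k with hu | hu | hu
  · rw [Nat.testBit_two_pow_add_gt hu]
    simp [Nat.ne_of_lt hu]
  · subst hu
    rw [Nat.testBit_two_pow_add_eq, Nat.testBit_lt_two_pow ha]
    simp
  · have h2 : 2 ^ (k + 1) ≤ 2 ^ u := Nat.pow_le_pow_right (by norm_num) hu
    have h1 : 2 ^ k + a < 2 ^ u := by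
      have : 2 ^ (k + 1) = 2 ^ k + 2 ^ k := by ring
      omega
    rw [Nat.testBit_lt_two_pow h1, Nat.testBit_lt_two_pow (by omega : a < 2 ^ u)]
    simp [Nat.ne_of_gt hu]

lemma pv_xor_top {k j : Nat} (hj : j < 2 ^ k) : (2 ^ k + j) ^^^ 2 ^ k = j := by
  apply Nat.eq_of_testBit_eq
  intro u
  rw [Nat.testBit_xor, pv_topbit u hj, Nat.testBit_two_pow]
  by_cases h : u = k
  · subst h
    simp [Nat.testBit_lt_two_pow hj]
  · rw [decide_eq_false (by omega : ¬(k = u))]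
    simp [h]

lemma pv_xor_low {k j t : Nat} (hj : j < 2 ^ k) (ht : t < k) :
    (2 ^ k + j) ^^^ 2 ^ t = 2 ^ k + (j ^^^ 2 ^ t) := by
  have hxl : j ^^^ 2 ^ t < 2 ^ k :=
    Nat.xor_lt_two_pow hj (Nat.pow_lt_pow_right (by norm_num) ht)
  apply Nat.eq_of_testBit_eq
  intro u
  rw [Nat.testBit_xor, pv_topbit u hj, pv_topbit u hxl, Nat.testBit_xor,
    Nat.testBit_two_pow]
  by_cases h : u = k
  · subst h
    simp [Nat.ne_of_lt ht]
  · simp [h]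

lemma pv_testBit_top_iff {k i : Nat} (hi : i < 2 ^ (k + 1)) :
    i.testBit k = decide (2 ^ k ≤ i) := by
  by_cases h : 2 ^ k ≤ i
  · have h2 : 2 ^ (k + 1) = 2 ^ k + 2 ^ k := by ring
    have := pv_topbit (k := k) (a := i - 2 ^ k) k (by omega)
    rw [Nat.add_sub_cancel' h] at this
    simp [this, h]
  · rw [Nat.testBit_lt_two_pow (by omega : i < 2 ^ k)]
    simp [h]

-- the fold of one pass preserves the length, for any bit
lemma pvPass_foldl_length (bit : Nat) (l : List Nat) : ∀ g : List Int,
    (l.foldl (fun r i =>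
      if i &&& bit ≠ 0 then r.set i (r.getD (i ^^^ bit) 0 - r.getD i 0) else r) g).length
      = g.length := by
  induction l with
  | nil => intro g; rfl
  | cons i l ih =>
      intro g
      simp only [List.foldl_cons]
      rw [ih]
      split <;> simp

lemma pvPass_length (g : List Int) (bit : Nat) : (pvPass g bit).length = g.length :=
  pvPass_foldl_length bit (List.range g.length) g

-- invariant of the pass fold over range m: entries below m with bit t set are rewritten
-- from the ORIGINAL values (the read positions are never written)
lemma pvPass_aux (t : Nat) (g : List Int) : ∀ m, m ≤ g.length →
    ∀ j, ((List.range m).foldl (fun r i =>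
        if i &&& 2 ^ t ≠ 0 then r.set i (r.getD (i ^^^ 2 ^ t) 0 - r.getD i 0) else r) g).getD j 0
      = if j < m ∧ j.testBit t then g.getD (j ^^^ 2 ^ t) 0 - g.getD j 0 else g.getD j 0 := by
  intro m
  induction m with
  | zero => intro _ j; simp
  | succ m ih =>
      intro hm j
      rw [List.range_succ, List.foldl_append, List.foldl_cons, List.foldl_nil]
      have ihm := ih (by omega)
      have hlen := pvPass_foldl_length (2 ^ t) (List.range m) g
      have hand : (m &&& 2 ^ t ≠ 0) ↔ m.testBit t := by
        rw [Nat.and_two_pow]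
        cases m.testBit t <;> simp
      by_cases hmt : m.testBit t
      · rw [if_pos (hand.mpr hmt)]
        have hxr : (m ^^^ 2 ^ t).testBit t = false := by
          rw [Nat.testBit_xor, hmt, Nat.testBit_two_pow_self]
          rfl
        have hread : (((List.range m).foldl (fun r i =>
            if i &&& 2 ^ t ≠ 0 then r.set i (r.getD (i ^^^ 2 ^ t) 0 - r.getD i 0) else r) g)).getD (m ^^^ 2 ^ t) 0
            = g.getD (m ^^^ 2 ^ t) 0 := by
          rw [ihm (m ^^^ 2 ^ t), if_neg (by simp [hxr])]
        have hself : (((List.range m).foldl (fun r i =>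
            if i &&& 2 ^ t ≠ 0 then r.set i (r.getD (i ^^^ 2 ^ t) 0 - r.getD i 0) else r) g)).getD m 0
            = g.getD m 0 := by
          rw [ihm m, if_neg (by omega)]
        rw [List.getD_eq_getElem?_getD, List.getElem?_set, hread, hself]
        by_cases hjm : m = j
        · subst hjm
          rw [if_pos rfl, if_pos (by rw [hlen]; omega), if_pos ⟨by omega, hmt⟩]
          rfl
        · rw [if_neg hjm, ← List.getD_eq_getElem?_getD, ihm j]
          by_cases hj : j < m ∧ j.testBit t
          · rw [if_pos hj, if_pos ⟨by omega, hj.2⟩]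
          · rw [if_neg hj, if_neg (by rintro ⟨h1, h2⟩; exact hj ⟨by omega, h2⟩)]
      · rw [if_neg (by simp [hand, hmt]), ihm j]
        by_cases hj : j < m ∧ j.testBit t
        · rw [if_pos hj, if_pos ⟨by omega, hj.2⟩]
        · rw [if_neg hj, if_neg (fun h => hj ⟨by
            rcases Nat.lt_succ_iff_lt_or_eq.mp h.1 with h' | h'
            · exact h'
            · exact absurd (h'.symm ▸ h.2) (by simp [hmt]), h.2⟩)]

lemma pvPass_getD (g : List Int) (t : Nat) (j : Nat) :
    (pvPass g (2 ^ t)).getD j 0 =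
      if j < g.length ∧ j.testBit t then g.getD (j ^^^ 2 ^ t) 0 - g.getD j 0 else g.getD j 0 :=
  pvPass_aux t g g.length le_rfl j

lemma pv_eq_of_getD {l1 l2 : List Int} (h : l1.length = l2.length)
    (hg : ∀ i, i < l1.length → l1.getD i 0 = l2.getD i 0) : l1 = l2 := by
  apply List.ext_getElem h
  intro i h1 h2
  have := hg i h1
  rwa [List.getD_eq_getElem _ _ h1, List.getD_eq_getElem _ _ h2] at this

-- the first pass (top bit) is exactly A's split step
lemma pvPass_top (f : List Int) (k : Nat) (hf : f.length = 2 ^ (k + 1)) :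
    pvPass f (2 ^ k) =
      f.take (2 ^ k) ++ ((f.take (2 ^ k)).zip (f.drop (2 ^ k))).map (fun p => p.1 - p.2) := by
  have hkk : 2 ^ (k + 1) = 2 ^ k + 2 ^ k := by ring
  have hlen : (f.take (2 ^ k) ++ ((f.take (2 ^ k)).zip (f.drop (2 ^ k))).map
      (fun p => p.1 - p.2)).length = 2 ^ (k + 1) := by
    simp [hf]; omega
  apply pv_eq_of_getD (by rw [pvPass_length, hf, hlen])
  intro i hi
  rw [pvPass_length, hf] at hi
  rw [pvPass_getD, hf, pv_testBit_top_iff hi]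
  have htk : (f.take (2 ^ k)).length = 2 ^ k := by simp [hf]; omega
  by_cases h : 2 ^ k ≤ i
  · rw [if_pos (by simpa using ⟨hi, h⟩)]
    have hxor : i ^^^ 2 ^ k = i - 2 ^ k := by
      have := pv_xor_top (k := k) (j := i - 2 ^ k) (by omega)
      rwa [Nat.add_sub_cancel' h] at this
    rw [List.getD_append_right _ _ _ _ (by omega), htk]
    have hidx : i - 2 ^ k < (((f.take (2 ^ k)).zip (f.drop (2 ^ k))).map
        (fun p : Int × Int => p.1 - p.2)).length := by simp [hf]; omega
    have h1 : i - 2 ^ k < f.length := by omega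
    have h2 : 2 ^ k + (i - 2 ^ k) = i := by omega
    rw [hxor, List.getD_eq_getElem _ _ h1, List.getD_eq_getElem _ _ (by omega : i < f.length),
      List.getD_eq_getElem _ _ hidx]
    simp only [List.getElem_map, List.getElem_zip, List.getElem_take, List.getElem_drop, h2]
  · rw [if_neg (by simp; omega), List.getD_append _ _ _ _ (by omega),
      List.getD_eq_getElem _ _ (by omega : i < (f.take (2 ^ k)).length), List.getElem_take,
      List.getD_eq_getElem _ _ (by omega : i < f.length)]

-- passes with a low bit act blockwise on a concatenation of two power-of-two halves
lemma pvPass_append {x y : List Int} {k t : Nat} (hx : x.length = 2 ^ k)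
    (hy : y.length = 2 ^ k) (ht : t < k) :
    pvPass (x ++ y) (2 ^ t) = pvPass x (2 ^ t) ++ pvPass y (2 ^ t) := by
  have hbit : 2 ^ t < 2 ^ k := Nat.pow_lt_pow_right (by norm_num) ht
  have hxy : (x ++ y).length = 2 ^ k + 2 ^ k := by simp [hx, hy]
  apply pv_eq_of_getD (by simp [pvPass_length, hx, hy])
  intro i hi
  rw [pvPass_length, hxy] at hi
  by_cases h : i < 2 ^ k
  · have hxor : i ^^^ 2 ^ t < 2 ^ k := Nat.xor_lt_two_pow h hbit
    have hR : (pvPass x (2 ^ t) ++ pvPass y (2 ^ t)).getD i 0 = (pvPass x (2 ^ t)).getD i 0 :=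
      List.getD_append _ _ _ _ (by rw [pvPass_length, hx]; exact h)
    rw [hR, pvPass_getD, pvPass_getD, hx, hxy,
      List.getD_append x y 0 (i ^^^ 2 ^ t) (by omega), List.getD_append x y 0 i (by omega)]
    by_cases hb : i.testBit t
    · rw [if_pos ⟨by omega, hb⟩, if_pos ⟨h, hb⟩]
    · rw [if_neg (by simp [hb]), if_neg (by simp [hb])]
  · set j := i - 2 ^ k with hjdef
    have hjlt : j < 2 ^ k := by omega
    have hij : i = 2 ^ k + j := by omega
    have hb : i.testBit t = j.testBit t := by
      rw [hij]; exact Nat.testBit_two_pow_add_gt ht j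
    have hR : (pvPass x (2 ^ t) ++ pvPass y (2 ^ t)).getD i 0 = (pvPass y (2 ^ t)).getD j 0 := by
      rw [List.getD_append_right _ _ _ _ (by rw [pvPass_length, hx]; omega),
        pvPass_length, hx]
    rw [hR, pvPass_getD, pvPass_getD, hy, hxy, List.getD_append_right x y 0 i (by omega), hx,
      ← hjdef]
    by_cases hbt : j.testBit t
    · have hxor : i ^^^ 2 ^ t = 2 ^ k + (j ^^^ 2 ^ t) := by rw [hij]; exact pv_xor_low hjlt ht
      rw [if_pos ⟨by omega, hb ▸ hbt⟩, if_pos ⟨hjlt, hbt⟩, hxor,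
        List.getD_append_right x y 0 _ (by omega), hx, Nat.add_sub_cancel_left]
    · rw [if_neg (by rw [hb]; simp [hbt]), if_neg (by simp [hbt])]

lemma pvLoop_zero (g : List Int) : pvLoop g 0 = g := by
  rw [pvLoop]
  simp

lemma pvLoop_ne (g : List Int) (b : Nat) (h : b ≠ 0) :
    pvLoop g b = pvLoop (pvPass g b) (b / 2) := by
  rw [pvLoop, if_neg h]

lemma pvLoop_append {k : Nat} : ∀ {s : Nat}, ∀ {x y : List Int},
    x.length = 2 ^ k → y.length = 2 ^ k → s < k →
    pvLoop (x ++ y) (2 ^ s) = pvLoop x (2 ^ s) ++ pvLoop y (2 ^ s) := by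
  intro s
  induction s with
  | zero =>
      intro x y hx hy hs
      rw [pvLoop_ne (x ++ y) (2 ^ 0) (by norm_num), pvLoop_ne x (2 ^ 0) (by norm_num),
        pvLoop_ne y (2 ^ 0) (by norm_num), (by norm_num : (2 : Nat) ^ 0 / 2 = 0),
        pvLoop_zero, pvLoop_zero, pvLoop_zero]
      exact pvPass_append hx hy hs
  | succ s ih =>
      intro x y hx hy hs
      have hne : (2 : Nat) ^ (s + 1) ≠ 0 := pow_ne_zero _ (by norm_num)
      have hdiv : 2 ^ (s + 1) / 2 = 2 ^ s := by
        rw [pow_succ, Nat.mul_div_cancel _ (by norm_num)]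
      rw [pvLoop_ne _ _ hne, pvLoop_ne _ _ hne, pvLoop_ne _ _ hne, hdiv,
        pvPass_append hx hy (by omega)]
      exact ih (by rw [pvPass_length, hx]) (by rw [pvPass_length, hy]) (by omega)

lemma pv_main (k : Nat) : ∀ f : List Int, f.length = 2 ^ k →
    undo_submask_sum f = pvLoop f (2 ^ k / 2) := by
  induction k with
  | zero =>
      intro f hf
      match f, hf with
      | [a], _ =>
          rw [undo_submask_sum]
          norm_num [pvLoop_zero, List.headI]
  | succ k ih =>
      intro f hf
      have h2 : (2 : Nat) ^ (k + 1) = 2 ^ k + 2 ^ k := by ring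
      have hpos : 0 < 2 ^ k := Nat.pow_pos (by norm_num)
      have hdiv : f.length / 2 = 2 ^ k := by
        rw [hf, pow_succ, Nat.mul_div_cancel _ (by norm_num)]
      have hx : (f.take (f.length / 2)).length = 2 ^ k := by
        simp [hf]; omega
      have hy : (((f.take (f.length / 2)).zip (f.drop (f.length / 2))).map
          (fun p : Int × Int => p.1 - p.2)).length = 2 ^ k := by
        simp [hf]; omega
      rw [undo_submask_sum, if_neg (by omega), if_neg (by omega), if_neg (by omega)]
      have hd1 : (2 : Nat) ^ (k + 1) / 2 = 2 ^ k := by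
        rw [pow_succ, Nat.mul_div_cancel _ (by norm_num)]
      have htop : pvPass f (2 ^ k) = f.take (f.length / 2) ++
          ((f.take (f.length / 2)).zip (f.drop (f.length / 2))).map (fun p => p.1 - p.2) := by
        rw [hdiv]
        exact pvPass_top f k hf
      rw [hd1, pvLoop_ne f (2 ^ k) (by omega), htop, ih _ hx, ih _ hy]
      cases k with
      | zero =>
          norm_num [pvLoop_zero]
      | succ k' =>
          have hd2 : (2 : Nat) ^ (k' + 1) / 2 = 2 ^ k' := by
            rw [pow_succ, Nat.mul_div_cancel _ (by norm_num)]
          rw [hd2]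
          exact (pvLoop_append (k := k' + 1) (s := k') hx hy (Nat.lt_succ_self k')).symm

-- ===== VERDICT (by name: the statement is the Claim_ definition above) =====
theorem undo_submask_sum_spec : Claim_equal_undo_submask_sum := by
  intro f _ hpre
  obtain ⟨k, -, hk⟩ := hpre
  unfold Spec_undo_submask_sum undo_submask_sum_alt
  have hpow : f.length ≠ 0 ∧ f.length &&& (f.length - 1) = 0 := by
    constructor
    · rw [hk]; positivity
    · rw [hk]
      apply Nat.eq_of_testBit_eq
      intro u
      simp
  rw [if_pos hpow, hk]
  exact pv_main k f hk
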